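-- pv_equiv track=rewrite | github.com/hongd2/Genome-Imputation | Genome Imputation.py | imputeMode
-- ===== SOURCE A (Python) =====
-- import operator
--
-- def imputeMode(train, test):
--     counts = {0:0, 1:0, 2:0}
--     for individual in range(len(train)):
--         if train[individual] == 0:
--             counts[0] = counts[0] + 1
--         elif train[individual] == 1:
--             counts[1] = counts[1] + 1
--         elif train[individual] == 2:
--             counts[2] = counts[2] + 1
--     mode = max(counts.items(), key=operator.itemgetter(1))[0]
--     return mode
-- ===== SOURCE B (Python) =====
-- def imputeMode(train, test):
--     # Three independent scans, one per genotype value; ties resolve to the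
--     # lowest value because the winner is replaced only on a strictly greater count.
--     best = 0
--     best_count = sum(1 for x in train if x == 0)
--     for v in (1, 2):
--         c = sum(1 for x in train if x == v)
--         if c > best_count:
--             best = v
--             best_count = c
--     return best
-- ===== Notes on version B (the rewrite author's own statement) =====
-- stated objective: alternative
-- what changed: Replaces A's single indexed counting pass into a dict followed by max over dict items with three independent per-value scans and a strictly-greater running winner, so no dict and no max call are needed.
import Mathlib
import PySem

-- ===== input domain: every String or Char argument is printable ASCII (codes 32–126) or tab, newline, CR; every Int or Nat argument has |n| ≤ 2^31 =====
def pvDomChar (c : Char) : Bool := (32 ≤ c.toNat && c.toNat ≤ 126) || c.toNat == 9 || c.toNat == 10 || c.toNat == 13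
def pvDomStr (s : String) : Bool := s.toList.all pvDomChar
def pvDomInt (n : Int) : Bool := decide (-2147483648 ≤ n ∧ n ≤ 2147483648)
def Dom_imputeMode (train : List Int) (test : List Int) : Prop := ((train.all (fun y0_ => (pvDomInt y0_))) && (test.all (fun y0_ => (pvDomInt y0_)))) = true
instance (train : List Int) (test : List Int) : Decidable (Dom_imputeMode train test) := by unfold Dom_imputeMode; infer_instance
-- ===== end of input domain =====

-- B replaces A's dict-counting pass + max-over-items with three per-value scans
-- and a strictly-greater running winner (alternative decomposition, same O(n) cost).


-- ===== PORT A =====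
-- counts = {0:0, 1:0, 2:0}; indexed loop over range(len(train)); mode = max(counts.items(), key=itemgetter(1))[0]
-- counts[k] is ported as getD k 0: the three keys are present from initialization, so no KeyError is possible.
def imputeMode (train : List Int) (_test : List Int) : Int :=
  let counts : PySem.Dict Int Int :=
    ((PySem.Dict.empty.insert 0 0).insert 1 0).insert 2 0
  let counts :=
    (PySem.List.pyRange 0 train.length 1).foldl (fun counts individual =>
      let x := PySem.List.pyGetD train individual 0   -- train[individual]; index always in range
      if x == 0 then counts.insert 0 (counts.getD 0 0 + 1)
      else if x == 1 then counts.insert 1 (counts.getD 1 0 + 1)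
      else if x == 2 then counts.insert 2 (counts.getD 2 0 + 1)
      else counts) counts
  match PySem.List.max? counts.items (fun p => p.2) with
  | some p => p.1
  | none => 0   -- unreachable: counts always has the three keys

-- ===== PORT B =====
-- sum(1 for x in train if x == v)
def pvCountEq (train : List Int) (v : Int) : Int :=
  train.foldl (fun acc x => if x == v then acc + 1 else acc) 0

def imputeMode_alt (train : List Int) (_test : List Int) : Int :=
  let init : Int × Int := (0, pvCountEq train 0)
  (([(1 : Int), 2]).foldl (fun st v =>
      let c := pvCountEq train v
      if c > st.2 then (v, c) else st) init).1

-- ===== PRECONDITION & SPEC =====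
def Spec_imputeMode (train : List Int) (test : List Int) (out : Int) : Prop := out = imputeMode_alt train test
instance (train : List Int) (test : List Int) (out : Int) : Decidable (Spec_imputeMode train test out) := by unfold Spec_imputeMode; infer_instance

-- ===== CLAIM (what is proved, stated in full; the proofs are below) =====
def Claim_equal_imputeMode : Prop := ∀ (train : List Int) (test : List Int), Dom_imputeMode train test → Spec_imputeMode train test (imputeMode train test)


-- ===== LEMMAS AND PROOFS =====

-- the three-key dict A maintains
def pvD3 (a b c : Int) : PySem.Dict Int Int :=
  ((PySem.Dict.empty.insert 0 a).insert 1 b).insert 2 c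

lemma pvFoldlCount (t : List Int) (v : Int) : ∀ a : Int,
    t.foldl (fun acc x => if x == v then acc + 1 else acc) a = a + (t.count v : Int) := by
  induction t with
  | nil => simp
  | cons y ys ih =>
    intro a
    simp only [List.foldl_cons, List.count_cons]
    rw [ih]
    by_cases h : y = v <;> simp [h] <;> ring

lemma pvCountEq_eq_count (t : List Int) (v : Int) : pvCountEq t v = (t.count v : Int) := by
  unfold pvCountEq
  rw [pvFoldlCount t v 0]
  ring

lemma pvD3_fold (t : List Int) : ∀ a b c : Int,
    t.foldl (fun (counts : PySem.Dict Int Int) x =>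
      if x == 0 then counts.insert 0 (counts.getD 0 0 + 1)
      else if x == 1 then counts.insert 1 (counts.getD 1 0 + 1)
      else if x == 2 then counts.insert 2 (counts.getD 2 0 + 1)
      else counts) (pvD3 a b c)
      = pvD3 (a + (t.count 0 : Int)) (b + (t.count 1 : Int)) (c + (t.count 2 : Int)) := by
  induction t with
  | nil => intro a b c; simp
  | cons x t ih =>
    intro a b c
    simp only [List.foldl_cons]
    by_cases h0 : x = 0
    · have hx : (if x == 0 then (pvD3 a b c).insert 0 ((pvD3 a b c).getD 0 0 + 1)
            else if x == 1 then (pvD3 a b c).insert 1 ((pvD3 a b c).getD 1 0 + 1)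
            else if x == 2 then (pvD3 a b c).insert 2 ((pvD3 a b c).getD 2 0 + 1)
            else pvD3 a b c) = pvD3 (a + 1) b c := by
        subst h0
        simp [pvD3, PySem.Dict.insert, PySem.Dict.getD, PySem.Dict.get?, PySem.Dict.empty]
      rw [hx, ih]
      subst h0
      congr 1 <;> simp <;> push_cast <;> ring
    · by_cases h1 : x = 1
      · have hx : (if x == 0 then (pvD3 a b c).insert 0 ((pvD3 a b c).getD 0 0 + 1)
            else if x == 1 then (pvD3 a b c).insert 1 ((pvD3 a b c).getD 1 0 + 1)
            else if x == 2 then (pvD3 a b c).insert 2 ((pvD3 a b c).getD 2 0 + 1)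
            else pvD3 a b c) = pvD3 a (b + 1) c := by
          subst h1
          simp [pvD3, PySem.Dict.insert, PySem.Dict.getD, PySem.Dict.get?, PySem.Dict.empty]
        rw [hx, ih]
        subst h1
        congr 1 <;> simp <;> push_cast <;> ring
      · by_cases h2 : x = 2
        · have hx : (if x == 0 then (pvD3 a b c).insert 0 ((pvD3 a b c).getD 0 0 + 1)
            else if x == 1 then (pvD3 a b c).insert 1 ((pvD3 a b c).getD 1 0 + 1)
            else if x == 2 then (pvD3 a b c).insert 2 ((pvD3 a b c).getD 2 0 + 1)
            else pvD3 a b c) = pvD3 a b (c + 1) := by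
            subst h2
            simp [pvD3, PySem.Dict.insert, PySem.Dict.getD, PySem.Dict.get?, PySem.Dict.empty]
          rw [hx, ih]
          subst h2
          congr 1 <;> simp <;> push_cast <;> ring
        · have hx : (if x == 0 then (pvD3 a b c).insert 0 ((pvD3 a b c).getD 0 0 + 1)
            else if x == 1 then (pvD3 a b c).insert 1 ((pvD3 a b c).getD 1 0 + 1)
            else if x == 2 then (pvD3 a b c).insert 2 ((pvD3 a b c).getD 2 0 + 1)
            else pvD3 a b c) = pvD3 a b c := by
            simp [h0, h1, h2]
          rw [hx, ih]
          congr 1 <;> simp [h0, h1, h2]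

lemma pvD3_items (a b c : Int) : (pvD3 a b c).items = [(0, a), (1, b), (2, c)] := by
  simp [pvD3, PySem.Dict.insert, PySem.Dict.empty]

-- ===== VERDICT (by name: the statement is the Claim_ definition above) =====
theorem imputeMode_spec : Claim_equal_imputeMode := by
  intro train test _
  unfold Spec_imputeMode imputeMode imputeMode_alt
  dsimp only
  rw [PySem.List.foldl_pyRange_zero_pyGetD' train 0
        (fun (counts : PySem.Dict Int Int) x =>
          if x == 0 then counts.insert 0 (counts.getD 0 0 + 1)
          else if x == 1 then counts.insert 1 (counts.getD 1 0 + 1)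
          else if x == 2 then counts.insert 2 (counts.getD 2 0 + 1)
          else counts)]
  rw [show ((PySem.Dict.empty.insert 0 0).insert 1 0).insert 2 0 = pvD3 0 0 0 from rfl]
  rw [pvD3_fold, pvD3_items]
  simp only [PySem.List.max?, List.foldl_cons, List.foldl_nil, zero_add, pvCountEq_eq_count]
  by_cases h1 : ((List.count 0 train : Int)) < ((List.count 1 train : Int)) <;>
    by_cases h2 : ((List.count 1 train : Int)) < ((List.count 2 train : Int)) <;>
      by_cases h3 : ((List.count 0 train : Int)) < ((List.count 2 train : Int)) <;>
        simp [h1, h2, h3] <;> omega
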